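-- pv_equiv track=rewrite | github.com/msiric/autodocs | scripts/match-helper.py | strip_source_root
-- ===== SOURCE A (Python) =====
-- def strip_source_root(file_path, source_roots):
--     """Strip the longest matching source root prefix from the file path."""
--     if not source_roots:
--         return file_path
--     # Sort by length descending so longest prefix matches first
--     for root in sorted(source_roots, key=len, reverse=True):
--         root = root.rstrip("/") + "/"
--         if file_path.startswith(root):
--             return file_path[len(root):]
--     return file_path
-- ===== SOURCE B (Python) =====
-- def strip_source_root(file_path, source_roots):
--     """Strip the longest matching source root prefix from the file path."""
--     best_root = None
--     best_norm = None
--     for root in source_roots: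
--         norm = root.rstrip("/") + "/"
--         if file_path.startswith(norm) and (best_root is None or len(root) > len(best_root)):
--             best_root = root
--             best_norm = norm
--     if best_norm is None:
--         return file_path
--     return file_path[len(best_norm):]
-- ===== Notes on version B (the rewrite author's own statement) =====
-- stated objective: alternative
-- what changed: Replaces the sort-by-length-then-scan with a single linear pass that tracks the best (longest, earliest-on-ties) matching root, removing the sort.
import Mathlib
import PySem

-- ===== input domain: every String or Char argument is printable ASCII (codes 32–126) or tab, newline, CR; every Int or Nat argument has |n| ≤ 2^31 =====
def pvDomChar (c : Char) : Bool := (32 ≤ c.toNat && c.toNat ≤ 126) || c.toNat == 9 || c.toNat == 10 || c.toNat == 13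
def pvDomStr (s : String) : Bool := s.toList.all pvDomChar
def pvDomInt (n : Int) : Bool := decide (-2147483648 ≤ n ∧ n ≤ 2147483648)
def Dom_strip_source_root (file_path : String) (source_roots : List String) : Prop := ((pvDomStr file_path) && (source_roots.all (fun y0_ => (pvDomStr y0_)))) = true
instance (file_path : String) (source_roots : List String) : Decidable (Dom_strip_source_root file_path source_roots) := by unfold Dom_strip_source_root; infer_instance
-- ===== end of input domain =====

-- B replaces A's sort-by-length-then-scan with a single linear pass tracking the
-- best (longest, earliest on ties) matching root (objective: alternative).

-- shared helper: the identical sub-expression root.rstrip("/") + "/" of both Pythons;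
-- rstrip("/") is ported by hand (drop trailing '/' characters) — exact on all strings
def pvRstripSlash (s : List Char) : List Char := (s.reverse.dropWhile (· == '/')).reverse
def pvNormRoot (r : String) : List Char := pvRstripSlash r.toList ++ ['/']

-- ===== PORT A =====
def pvLoopA (fp : String) : List String → String
  | [] => fp
  | r :: rest =>
    let root := pvNormRoot r
    if PySem.Chars.startswith fp.toList root then
      PySem.Str.slice fp (some (root.length : Int)) none
    else pvLoopA fp rest

def strip_source_root (file_path : String) (source_roots : List String) : String :=
  if source_roots = [] then file_path
  else pvLoopA file_path (PySem.List.sorted source_roots PySem.Str.len true)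

-- ===== PORT B =====
def pvStepB (fp : String) (best : Option (String × List Char)) (r : String) :
    Option (String × List Char) :=
  let norm := pvNormRoot r
  if PySem.Chars.startswith fp.toList norm
      && (match best with
          | none => true
          | some (b, _) => decide (PySem.Str.len b < PySem.Str.len r))
  then some (r, norm) else best

def strip_source_root_alt (file_path : String) (source_roots : List String) : String :=
  match source_roots.foldl (pvStepB file_path) none with
  | none => file_path
  | some (_, norm) => PySem.Str.slice file_path (some (norm.length : Int)) none

-- ===== PRECONDITION & SPEC =====
def Spec_strip_source_root (file_path : String) (source_roots : List String) (out : String) : Prop := out = strip_source_root_alt file_path source_roots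
instance (file_path : String) (source_roots : List String) (out : String) : Decidable (Spec_strip_source_root file_path source_roots out) := by unfold Spec_strip_source_root; infer_instance

-- ===== CLAIM (what is proved, stated in full; the proofs are below) =====
def Claim_equal_strip_source_root : Prop := ∀ (file_path : String) (source_roots : List String), Dom_strip_source_root file_path source_roots → Spec_strip_source_root file_path source_roots (strip_source_root file_path source_roots)

-- ===== LEMMAS AND PROOFS =====

-- P r: the normalized root is a prefix of the file path
def pvP (fp r : String) : Bool := PySem.Chars.startswith fp.toList (pvNormRoot r)

-- first element of the list satisfying pvP (what A's scan over the sorted list selects)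
def pvFirstP (fp : String) : List String → Option String
  | [] => none
  | r :: t => if pvP fp r then some r else pvFirstP fp t

-- B's accumulator step, on the root alone
def pvBestStep (fp : String) (acc : Option String) (r : String) : Option String :=
  if pvP fp r
      && (match acc with
          | none => true
          | some b => decide (PySem.Str.len b < PySem.Str.len r))
  then some r else acc

theorem pvFirstP_mem (fp : String) (L : List String) (b : String)
    (h : pvFirstP fp L = some b) : b ∈ L := by
  induction L with
  | nil => simp [pvFirstP] at h
  | cons y t ih =>
    by_cases hy : pvP fp y
    · simp [pvFirstP, hy] at h; simp [h]
    · simp [pvFirstP, hy] at h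
      exact List.mem_cons_of_mem _ (ih h)

-- A-side bridge: the scan returns the slice at the first matching root
theorem pvLoopA_eq (fp : String) (L : List String) :
    pvLoopA fp L =
      match pvFirstP fp L with
      | none => fp
      | some r => PySem.Str.slice fp (some ((pvNormRoot r).length : Int)) none := by
  induction L with
  | nil => simp [pvLoopA, pvFirstP]
  | cons y t ih =>
    by_cases hy : pvP fp y
    · simp [pvLoopA, pvFirstP, pvP] at hy ⊢; simp [hy]
    · simp [pvLoopA, pvFirstP, pvP] at hy ⊢; simp [hy, ih]

-- B-side bridge: the pair-carrying fold is the root-only fold with the norm recomputed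
theorem pvFoldB_eq (fp : String) (xs : List String) (b : Option String) :
    xs.foldl (pvStepB fp) (b.map (fun r => (r, pvNormRoot r)))
      = (xs.foldl (pvBestStep fp) b).map (fun r => (r, pvNormRoot r)) := by
  induction xs generalizing b with
  | nil => rfl
  | cons x t ih =>
    have hstep : pvStepB fp (b.map (fun r => (r, pvNormRoot r))) x
        = (pvBestStep fp b x).map (fun r => (r, pvNormRoot r)) := by
      cases b with
      | none => simp [pvStepB, pvBestStep, pvP]
      | some b0 =>
        simp [pvStepB, pvBestStep, pvP]
        split <;> simp_all
    simpa [List.foldl, hstep] using ih (pvBestStep fp b x)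

-- core: inserting x into a length-descending list commutes first-match with B's step
theorem pvFirstP_insertBy (fp x : String) (L : List String)
    (h : L.Pairwise (fun a b => PySem.Str.len b ≤ PySem.Str.len a)) :
    pvFirstP fp
        (PySem.List.insertBy
          (fun a b => decide (PySem.Str.len b < PySem.Str.len a)) x L)
      = pvBestStep fp (pvFirstP fp L) x := by
  induction L with
  | nil => simp [PySem.List.insertBy, pvFirstP, pvBestStep]
  | cons y t ih =>
    rcases List.pairwise_cons.mp h with ⟨hy, ht⟩
    by_cases hlt : PySem.Str.len y < PySem.Str.len x
    · -- x goes in front: every element of y :: t has key < key x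
      have hlt' : y.length < x.length := by
        simpa [PySem.Str.len] using hlt
      have hins : PySem.List.insertBy
          (fun a b => decide (PySem.Str.len b < PySem.Str.len a)) x (y :: t)
          = x :: y :: t := by
        simp only [PySem.List.insertBy, PySem.Str.len]
        simp
        intro hc
        omega
      rw [hins]
      by_cases hx : pvP fp x
      · rcases hb : pvFirstP fp (y :: t) with _ | b
        · simp [pvFirstP, pvBestStep, hx]
        · have hmem := pvFirstP_mem fp (y :: t) b hb
          have hble : PySem.Str.len b ≤ PySem.Str.len y := by
            rcases List.mem_cons.mp hmem with rfl | hbt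
            · exact le_refl _
            · exact hy b hbt
          have hbx : b.length < x.length := by
            have := lt_of_le_of_lt hble hlt
            simpa [PySem.Str.len] using this
          simp [pvFirstP, pvBestStep, PySem.Str.len, hx]
          intro hc
          omega
      · simp [pvFirstP, pvBestStep, hx]
    · -- x goes after y
      have hlt' : ¬ y.length < x.length := by
        simpa [PySem.Str.len] using hlt
      have hins : PySem.List.insertBy
          (fun a b => decide (PySem.Str.len b < PySem.Str.len a)) x (y :: t)
          = y :: PySem.List.insertBy
              (fun a b => decide (PySem.Str.len b < PySem.Str.len a)) x t := by
        simp only [PySem.List.insertBy, PySem.Str.len]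
        simp
        intro hc
        omega
      rw [hins]
      by_cases hyP : pvP fp y
      · simp [pvFirstP, pvBestStep, PySem.Str.len, hyP]
        intro _ hc
        omega
      · simpa [pvFirstP, hyP] using ih ht

-- main: the first match of the reverse-sorted list equals B's running best
theorem pvFirstP_sorted (fp : String) (xs : List String) :
    pvFirstP fp (PySem.List.sorted xs PySem.Str.len true)
      = xs.foldl (pvBestStep fp) none := by
  induction xs using List.reverseRecOn with
  | nil => simp [PySem.List.sorted_rev_eq_foldl_insertBy, pvFirstP]
  | append_singleton xs x ih =>
    rw [PySem.List.sorted_rev_eq_foldl_insertBy, List.foldl_append, List.foldl_append]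
    simp only [List.foldl]
    rw [← PySem.List.sorted_rev_eq_foldl_insertBy,
      pvFirstP_insertBy fp x _ (PySem.List.sorted_pairwise_rev xs PySem.Str.len), ih]

-- ===== VERDICT (by name: the statement is the Claim_ definition above) =====
theorem strip_source_root_spec : Claim_equal_strip_source_root := by
  intro fp roots _
  unfold Spec_strip_source_root strip_source_root strip_source_root_alt
  have hfold : roots.foldl (pvStepB fp) none
      = (roots.foldl (pvBestStep fp) none).map (fun r => (r, pvNormRoot r)) := by
    simpa using pvFoldB_eq fp roots none
  by_cases hnil : roots = []
  · simp [hnil]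
  · rw [if_neg hnil, pvLoopA_eq, pvFirstP_sorted, hfold]
    rcases roots.foldl (pvBestStep fp) none with _ | r <;> simp
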